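-- pv_equiv track=rewrite | github.com/KovaKreative/python-course | functions/sum-69.py | summer_69
-- ===== SOURCE A (Python) =====
-- def summer_69(arr):
--
--   skip = False
--
--   sum = 0
--
--   for i in arr:
--
--     if i == 6:
--       skip = True
--
--     if not skip:
--       sum += i
--
--     if skip and i == 9:
--       skip = False
--
--   return sum
-- ===== SOURCE B (Python) =====
-- def summer_69(arr):
--     # Total-minus-segments: sum everything, then locate each 6..9 stretch with
--     # list.index and subtract its slice sum.
--     total = sum(arr)
--     j = 0
--     n = len(arr)
--     while j < n:
--         try:
--             s = arr.index(6, j)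
--         except ValueError:
--             break
--         try:
--             e = arr.index(9, s + 1)
--         except ValueError:
--             total -= sum(arr[s:])
--             break
--         total -= sum(arr[s:e + 1])
--         j = e + 1
--     return total
-- ===== Notes on version B (the rewrite author's own statement) =====
-- stated objective: alternative
-- what changed: Instead of a per-element skip-flag pass, B computes sum(arr) once and then subtracts each 6..9 segment, locating segment boundaries with list.index and summing them via slices.
import Mathlib
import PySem

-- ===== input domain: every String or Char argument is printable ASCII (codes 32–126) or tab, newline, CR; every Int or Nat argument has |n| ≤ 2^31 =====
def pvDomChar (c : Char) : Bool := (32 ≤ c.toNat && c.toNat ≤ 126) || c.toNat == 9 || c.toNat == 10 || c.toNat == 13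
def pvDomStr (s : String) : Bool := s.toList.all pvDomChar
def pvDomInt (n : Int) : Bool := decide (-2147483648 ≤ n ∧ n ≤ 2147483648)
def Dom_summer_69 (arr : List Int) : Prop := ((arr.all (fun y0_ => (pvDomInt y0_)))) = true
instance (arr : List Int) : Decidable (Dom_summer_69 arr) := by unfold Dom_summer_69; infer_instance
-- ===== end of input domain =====

-- B computes sum(arr) and subtracts each 6..9 segment located with list.index and sliced out: alternative decomposition (subtractive, segment-based), same cost.


-- ===== PORT A =====
-- A: one pass with a boolean skip flag, folded over (skip, sum).
def summer_69_step (st : Bool × Int) (i : Int) : Bool × Int :=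
  let skip1 := if i == 6 then true else st.1
  let sum1  := if !skip1 then st.2 + i else st.2
  let skip2 := if skip1 && i == 9 then false else skip1
  (skip2, sum1)

def summer_69 (arr : List Int) : Int :=
  (arr.foldl summer_69_step (false, 0)).2

-- ===== PORT B =====
-- sum(l) of Source B
def summer_69_sum (l : List Int) : Int := l.foldl (· + ·) 0

-- the while loop of Source B over (total, j).
-- arr.index(v, j) is ported as (j + index? of v in arr.drop j) — exact since 0 ≤ j;
-- arr[s:] is arr.drop s and arr[s:e+1] is (arr.drop s).take (e+1-s) — exact since 0 ≤ s ≤ e+1.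
def summer_69_loop (arr : List Int) (total : Int) (j : Nat) : Int :=
  if _h : j < arr.length then
    match PySem.List.index? (arr.drop j) 6 with
    | none => total
    | some s' =>
      let s := j + s'
      match PySem.List.index? (arr.drop (s + 1)) 9 with
      | none => total - summer_69_sum (arr.drop s)
      | some e' =>
        let e := s + 1 + e'
        summer_69_loop arr (total - summer_69_sum ((arr.drop s).take (e + 1 - s))) (e + 1)
  else total
termination_by arr.length - j
decreasing_by omega

def summer_69_alt (arr : List Int) : Int :=
  summer_69_loop arr (summer_69_sum arr) 0

-- ===== PRECONDITION & SPEC =====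
def Spec_summer_69 (arr : List Int) (out : Int) : Prop := out = summer_69_alt arr
instance (arr : List Int) (out : Int) : Decidable (Spec_summer_69 arr out) := by unfold Spec_summer_69; infer_instance

-- ===== CLAIM =====
def Claim_equal_summer_69 : Prop := ∀ (arr : List Int), Dom_summer_69 arr → Spec_summer_69 arr (summer_69 arr)

-- ===== LEMMAS AND PROOFS =====
-- Reference function: structural scan skipping 6..9 stretches; both ports are related to it.
def summer_69_skipTo9 : List Int → List Int
  | [] => []
  | x :: xs => if x == 9 then xs else summer_69_skipTo9 xs

theorem summer_69_skipTo9_len_le : ∀ (l : List Int), (summer_69_skipTo9 l).length ≤ l.length := by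
  intro l
  induction l with
  | nil => simp [summer_69_skipTo9]
  | cons x xs ih =>
    simp only [summer_69_skipTo9]
    split
    · simp
    · exact Nat.le_succ_of_le ih

def summer_69_scan : List Int → Int
  | [] => 0
  | x :: xs =>
    if x == 6 then summer_69_scan (summer_69_skipTo9 xs)
    else x + summer_69_scan xs
termination_by l => l.length
decreasing_by
  · exact Nat.lt_succ_of_le (summer_69_skipTo9_len_le xs)
  · simp

-- A's fold invariant: from skip=false it adds scan l; from skip=true, scan (skipTo9 l).
theorem summer_69_fold_inv : ∀ (l : List Int) (s : Int),
    (l.foldl summer_69_step (false, s)).2 = s + summer_69_scan l ∧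
    (l.foldl summer_69_step (true, s)).2 = s + summer_69_scan (summer_69_skipTo9 l) := by
  intro l
  induction l with
  | nil => intro s; simp [summer_69_scan, summer_69_skipTo9]
  | cons x xs ih =>
    intro s
    constructor
    · by_cases hx : x = 6
      · subst hx
        simpa [summer_69_step, summer_69_scan] using (ih s).2
      · have : summer_69_step (false, s) x = (false, s + x) := by
          simp [summer_69_step, hx]
        rw [List.foldl_cons, this, summer_69_scan]
        simp [hx, (ih (s + x)).1]
        ring
    · by_cases hx : x = 9
      · subst hx
        have : summer_69_step (true, s) 9 = (false, s) := by
          simp [summer_69_step]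
        rw [List.foldl_cons, this]
        simp [summer_69_skipTo9, (ih s).1]
      · have : summer_69_step (true, s) x = (true, s) := by
          simp [summer_69_step, hx]
        rw [List.foldl_cons, this]
        simp [summer_69_skipTo9, hx, (ih s).2]

theorem summer_69_sum_eq_sum : ∀ (l : List Int), summer_69_sum l = l.sum := by
  have h : ∀ (l : List Int) (a : Int), l.foldl (· + ·) a = a + l.sum := by
    intro l
    induction l with
    | nil => simp
    | cons x xs ih => intro a; simp [ih]; ring
  intro l; simpa using h l 0

theorem summer_69_scan_no6 : ∀ (l : List Int), 6 ∉ l → summer_69_scan l = l.sum := by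
  intro l
  induction l with
  | nil => simp [summer_69_scan]
  | cons x xs ih =>
    intro h
    rw [summer_69_scan]
    have hx : x ≠ 6 := fun he => h (he ▸ List.mem_cons_self)
    simp [hx, ih (fun hm => h (List.mem_cons_of_mem _ hm))]

theorem summer_69_scan_pre6 : ∀ (pre suf : List Int), 6 ∉ pre →
    summer_69_scan (pre ++ 6 :: suf) = pre.sum + summer_69_scan (summer_69_skipTo9 suf) := by
  intro pre
  induction pre with
  | nil => intro suf _; simp [summer_69_scan]
  | cons x xs ih =>
    intro suf h
    have hx : x ≠ 6 := fun he => h (he ▸ List.mem_cons_self)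
    rw [List.cons_append, summer_69_scan]
    simp [hx, ih suf (fun hm => h (List.mem_cons_of_mem _ hm))]
    ring

theorem summer_69_skipTo9_no9 : ∀ (l : List Int), 9 ∉ l → summer_69_skipTo9 l = [] := by
  intro l
  induction l with
  | nil => simp [summer_69_skipTo9]
  | cons x xs ih =>
    intro h
    have hx : x ≠ 9 := fun he => h (he ▸ List.mem_cons_self)
    simp [summer_69_skipTo9, hx, ih (fun hm => h (List.mem_cons_of_mem _ hm))]

theorem summer_69_skipTo9_pre9 : ∀ (pre suf : List Int), 9 ∉ pre →
    summer_69_skipTo9 (pre ++ 9 :: suf) = suf := by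
  intro pre
  induction pre with
  | nil => intro suf _; simp [summer_69_skipTo9]
  | cons x xs ih =>
    intro suf h
    have hx : x ≠ 9 := fun he => h (he ▸ List.mem_cons_self)
    simp [summer_69_skipTo9, hx, ih suf (fun hm => h (List.mem_cons_of_mem _ hm))]

-- B's loop invariant: it corrects total by replacing sum of the tail with scan of the tail.
theorem summer_69_loop_inv : ∀ (arr : List Int) (total : Int) (j : Nat),
    summer_69_loop arr total j = total - (arr.drop j).sum + summer_69_scan (arr.drop j) := by
  intro arr total j
  induction total, j using summer_69_loop.induct arr with
  | case4 total j h =>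
    rw [summer_69_loop]
    simp [List.drop_eq_nil_of_le (by omega : arr.length ≤ j), summer_69_scan, h]
  | case1 total j h hnone =>
    rw [summer_69_loop]
    simp only [h, dif_pos, hnone]
    have h6 : 6 ∉ arr.drop j := (PySem.List.index?_eq_none_iff _ _).1 hnone
    rw [summer_69_scan_no6 _ h6]; ring
  | case2 total j h s' hs' s hnone9 =>
    rw [summer_69_loop]
    obtain ⟨pre, suf, hd, hlen, hnotin⟩ := (PySem.List.index?_eq_some_iff _ _ _).1 hs'
    have hdropS : arr.drop (j + s') = 6 :: suf := by
      rw [← List.drop_drop, hd, ← hlen, List.drop_append_of_le_length (le_refl _)]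
      simp
    have hsuf : arr.drop (j + s' + 1) = suf := by
      rw [← List.drop_drop (j := j + s'), hdropS]; simp
    have h9 : 9 ∉ suf := (PySem.List.index?_eq_none_iff _ _).1 (hsuf ▸ hnone9)
    have hnone9' : PySem.List.index? (arr.drop (j + s' + 1)) 9 = none := hnone9
    simp only [h, dif_pos, hs', hnone9']
    rw [summer_69_sum_eq_sum, hdropS, hd, summer_69_scan_pre6 _ _ hnotin,
        summer_69_skipTo9_no9 _ h9]
    simp [summer_69_scan, List.sum_append]
    ring
  | case3 total j h s' hs' s e' hsome9 e ih =>
    rw [summer_69_loop]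
    obtain ⟨pre, suf, hd, hlen, hnotin⟩ := (PySem.List.index?_eq_some_iff _ _ _).1 hs'
    have hdropS : arr.drop (j + s') = 6 :: suf := by
      rw [← List.drop_drop, hd, ← hlen, List.drop_append_of_le_length (le_refl _)]
      simp
    have hsuf : arr.drop (j + s' + 1) = suf := by
      rw [← List.drop_drop (j := j + s'), hdropS]; simp
    obtain ⟨pre2, suf2, hd2, hlen2, hnotin2⟩ :=
      (PySem.List.index?_eq_some_iff _ _ _).1 (hsuf ▸ hsome9)
    have hsplit : suf = (pre2 ++ [(9:Int)]) ++ suf2 := by rw [hd2]; simp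
    have hlen2' : (pre2 ++ [(9:Int)]).length = e' + 1 := by simp [hlen2]
    have hdropE : arr.drop (j + s' + 1 + e' + 1) = suf2 := by
      rw [show j + s' + 1 + e' + 1 = (j + s' + 1) + (e' + 1) by omega,
          ← List.drop_drop (j := j + s' + 1), hsuf, hsplit, ← hlen2',
          List.drop_append_of_le_length (le_refl _)]
      simp
    have htake : (arr.drop (j + s')).take (j + s' + 1 + e' + 1 - (j + s')) = 6 :: (pre2 ++ [9]) := by
      rw [hdropS, show j + s' + 1 + e' + 1 - (j + s') = (e' + 1) + 1 by omega,
          List.take_succ_cons, hsplit, ← hlen2', List.take_left]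
    have hsome9' : PySem.List.index? (arr.drop (j + s' + 1)) 9 = some e' := hsome9
    simp only [h, dif_pos, hs', hsome9']
    have ih' : summer_69_loop arr
        (total - summer_69_sum ((arr.drop (j + s')).take (j + s' + 1 + e' + 1 - (j + s'))))
        (j + s' + 1 + e' + 1) = total
          - summer_69_sum ((arr.drop (j + s')).take (j + s' + 1 + e' + 1 - (j + s')))
          - (arr.drop (j + s' + 1 + e' + 1)).sum
          + summer_69_scan (arr.drop (j + s' + 1 + e' + 1)) := ih
    rw [summer_69_sum_eq_sum] at ih' ⊢
    rw [htake] at ih'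
    rw [hdropE] at ih'
    rw [htake]
    rw [ih', hd, summer_69_scan_pre6 _ _ hnotin, hd2, summer_69_skipTo9_pre9 _ _ hnotin2]
    simp [List.sum_append]
    ring

-- ===== VERDICT =====
theorem summer_69_spec : Claim_equal_summer_69 := by
  intro arr _
  unfold Spec_summer_69 summer_69 summer_69_alt
  rw [summer_69_loop_inv, summer_69_sum_eq_sum]
  simpa using (summer_69_fold_inv arr 0).1
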